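-- pv_equiv track=rewrite | github.com/Joru-chan/assistant | scripts/triage.py | _theme_from_domain
-- ===== SOURCE A (Python) =====
-- from typing import Any, Dict, List
--
-- DOMAIN_THEME_PRIORITY = [
--     ({"recipes", "instagram"}, "recipe capture"),
--     ({"groceries", "inventory"}, "pantry inventory"),
--     ({"pantry", "reading", "knowledge", "ocr", "capture"}, "knowledge capture"),
-- ]
--
-- def _theme_from_domain(domains: List[str]) -> str | None:
--     if not domains:
--         return None
--     domain_set = {domain.strip().lower() for domain in domains if domain.strip()}
--     if not domain_set:
--         return None
--     for candidates, theme in DOMAIN_THEME_PRIORITY: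
--         if domain_set.intersection(candidates):
--             return theme
--     return None
-- ===== SOURCE B (Python) =====
-- from typing import List
--
-- DOMAIN_THEME_PRIORITY = [
--     ({"recipes", "instagram"}, "recipe capture"),
--     ({"groceries", "inventory"}, "pantry inventory"),
--     ({"pantry", "reading", "knowledge", "ocr", "capture"}, "knowledge capture"),
-- ]
--
-- # keyword -> (rank, theme), inverting DOMAIN_THEME_PRIORITY (groups are disjoint)
-- _KEYWORD_RANK = {
--     kw: (rank, theme)
--     for rank, (kws, theme) in enumerate(DOMAIN_THEME_PRIORITY)
--     for kw in kws
-- }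
--
-- def _theme_from_domain(domains: List[str]) -> str | None:
--     best = None
--     for domain in domains:
--         key = domain.strip().lower()
--         if not key:
--             continue
--         entry = _KEYWORD_RANK.get(key)
--         if entry is not None and (best is None or entry[0] < best[0]):
--             best = entry
--     return best[1] if best is not None else None
-- ===== Notes on version B (the rewrite author's own statement) =====
-- stated objective: idiomatic
-- what changed: Replaces the per-group set-intersection scan with an inverted keyword->(rank,theme) lookup table and a single pass over the domains keeping the smallest rank seen.
import Mathlib
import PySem

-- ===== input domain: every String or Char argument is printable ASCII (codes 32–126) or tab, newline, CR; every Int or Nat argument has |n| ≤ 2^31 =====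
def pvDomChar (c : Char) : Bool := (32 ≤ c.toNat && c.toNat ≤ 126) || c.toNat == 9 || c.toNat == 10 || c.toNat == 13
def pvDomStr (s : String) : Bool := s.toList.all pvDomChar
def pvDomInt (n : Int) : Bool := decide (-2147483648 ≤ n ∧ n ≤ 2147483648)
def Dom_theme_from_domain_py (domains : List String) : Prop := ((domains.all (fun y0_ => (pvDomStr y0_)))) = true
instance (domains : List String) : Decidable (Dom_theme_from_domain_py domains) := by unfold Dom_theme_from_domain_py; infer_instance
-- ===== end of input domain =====

-- B replaces A's per-group set-intersection scan with an inverted keyword->(rank, theme)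
-- lookup table and a single min-rank pass over the domains (objective: alternative/idiomatic).

-- ===== PORT A =====
def pvPriority : List (PySem.Set String × String) :=
  [ (PySem.Set.ofList ["recipes", "instagram"], "recipe capture"),
    (PySem.Set.ofList ["groceries", "inventory"], "pantry inventory"),
    (PySem.Set.ofList ["pantry", "reading", "knowledge", "ocr", "capture"], "knowledge capture") ]

-- the 'for candidates, theme in DOMAIN_THEME_PRIORITY' loop with its early return
def pvScanA : List (PySem.Set String × String) → PySem.Set String → Option String
  | [], _ => none
  | (candidates, theme) :: rest, s =>
      if PySem.Set.inter s candidates ≠ [] then some theme else pvScanA rest s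

def theme_from_domain_py (domains : List String) : Option String :=
  if domains = [] then none
  else
    let domain_set := domains.foldl
      (fun s d => if PySem.Str.strip d ≠ "" then PySem.Set.add s (PySem.Str.lower (PySem.Str.strip d)) else s)
      PySem.Set.empty
    if domain_set = PySem.Set.empty then none
    else pvScanA pvPriority domain_set

-- ===== PORT B =====
-- the dict comprehension inverting DOMAIN_THEME_PRIORITY (groups are disjoint)
def pvKeywordRank : PySem.Dict String (Int × String) :=
  PySem.Dict.ofList
    [ ("recipes", (0, "recipe capture")), ("instagram", (0, "recipe capture")),
      ("groceries", (1, "pantry inventory")), ("inventory", (1, "pantry inventory")),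
      ("pantry", (2, "knowledge capture")), ("reading", (2, "knowledge capture")),
      ("knowledge", (2, "knowledge capture")), ("ocr", (2, "knowledge capture")),
      ("capture", (2, "knowledge capture")) ]

def pvStepB (best : Option (Int × String)) (d : String) : Option (Int × String) :=
  let key := PySem.Str.lower (PySem.Str.strip d)
  if key = "" then best
  else
    match PySem.Dict.get? pvKeywordRank key with
    | none => best
    | some e =>
        match best with
        | none => some e
        | some b => if e.1 < b.1 then some e else best

def theme_from_domain_py_alt (domains : List String) : Option String :=
  (domains.foldl pvStepB none).map (·.2)

-- ===== PRECONDITION & SPEC =====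
def Spec_theme_from_domain_py (domains : List String) (out : Option String) : Prop := out = theme_from_domain_py_alt domains
instance (domains : List String) (out : Option String) : Decidable (Spec_theme_from_domain_py domains out) := by unfold Spec_theme_from_domain_py; infer_instance

-- ===== CLAIM (what is proved, stated in full; the proofs are below) =====
def Claim_equal_theme_from_domain_py : Prop := ∀ (domains : List String), Dom_theme_from_domain_py domains → Spec_theme_from_domain_py domains (theme_from_domain_py domains)

-- ===== LEMMAS AND PROOFS =====

-- normalization shared by both readings
def pvNorm (d : String) : String := PySem.Str.lower (PySem.Str.strip d)

def pvG0 : List String := ["recipes", "instagram"]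
def pvG1 : List String := ["groceries", "inventory"]
def pvG2 : List String := ["pantry", "reading", "knowledge", "ocr", "capture"]

def pvHit (ds : List String) (g : List String) : Bool := ds.any (fun d => decide (pvNorm d ∈ g))

-- common canonical value: the (rank, theme) of the best-priority group hit by any domain
def pvChain (b0 b1 b2 : Bool) : Option (Int × String) :=
  if b0 then some (0, "recipe capture")
  else if b1 then some (1, "pantry inventory")
  else if b2 then some (2, "knowledge capture")
  else none

def pvCanonE (ds : List String) : Option (Int × String) :=
  pvChain (pvHit ds pvG0) (pvHit ds pvG1) (pvHit ds pvG2)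

def pvMerge (o n : Option (Int × String)) : Option (Int × String) :=
  match o, n with
  | none, n => n
  | o, none => o
  | some b, some e => if e.1 < b.1 then some e else some b

def pvEntry (d : String) : Option (Int × String) := PySem.Dict.get? pvKeywordRank (pvNorm d)

theorem pvMerge_none (a : Option (Int × String)) : pvMerge a none = a := by
  cases a <;> rfl

theorem pvMerge_chain (p0 p1 p2 b0 b1 b2 : Bool) :
    pvMerge (pvChain p0 p1 p2) (pvChain b0 b1 b2) = pvChain (p0 || b0) (p1 || b1) (p2 || b2) := by
  cases p0 <;> cases p1 <;> cases p2 <;> cases b0 <;> cases b1 <;> cases b2 <;> decide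

theorem pvMerge_assoc (a b c : Option (Int × String)) :
    pvMerge (pvMerge a b) c = pvMerge a (pvMerge b c) := by
  cases a with
  | none => rfl
  | some x =>
    cases b with
    | none => rfl
    | some y =>
      cases c with
      | none => simp [pvMerge_none]
      | some z =>
        by_cases hxy : y.1 < x.1 <;> by_cases hyz : z.1 < y.1 <;> by_cases hxz : z.1 < x.1 <;>
          simp [pvMerge, hxy, hyz, hxz] <;> omega

theorem pvStepB_eq_merge (best : Option (Int × String)) (d : String) :
    pvStepB best d = pvMerge best (pvEntry d) := by
  by_cases h : PySem.Str.lower (PySem.Str.strip d) = ""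
  · have hE : pvEntry d = none := by
      unfold pvEntry pvNorm; rw [h]; decide
    rw [hE, pvMerge_none]; simp [pvStepB, h]
  · simp only [pvStepB, pvEntry, pvNorm, h, if_false]
    cases hg : PySem.Dict.get? pvKeywordRank (PySem.Str.lower (PySem.Str.strip d)) <;>
      cases best <;> simp [pvMerge]

theorem pvFoldB (ds : List String) (acc : Option (Int × String)) :
    ds.foldl pvStepB acc = pvMerge acc (ds.foldl pvStepB none) := by
  induction ds generalizing acc with
  | nil => simp [pvMerge_none]
  | cons d ds ih =>
      simp only [List.foldl_cons]
      rw [ih (pvStepB acc d), ih (pvStepB none d), pvStepB_eq_merge, pvStepB_eq_merge,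
        pvMerge_assoc]
      rfl

theorem pvEntry_char (d : String) :
    pvEntry d = pvChain (decide (pvNorm d ∈ pvG0)) (decide (pvNorm d ∈ pvG1)) (decide (pvNorm d ∈ pvG2)) := by
  unfold pvEntry
  generalize pvNorm d = k
  by_cases h1 : k = "recipes";   · subst h1; decide
  by_cases h2 : k = "instagram"; · subst h2; decide
  by_cases h3 : k = "groceries"; · subst h3; decide
  by_cases h4 : k = "inventory"; · subst h4; decide
  by_cases h5 : k = "pantry";    · subst h5; decide
  by_cases h6 : k = "reading";   · subst h6; decide
  by_cases h7 : k = "knowledge"; · subst h7; decide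
  by_cases h8 : k = "ocr";       · subst h8; decide
  by_cases h9 : k = "capture";   · subst h9; decide
  have hmk : pvKeywordRank = PySem.Dict.mk
      [ ("recipes", (0, "recipe capture")), ("instagram", (0, "recipe capture")),
        ("groceries", (1, "pantry inventory")), ("inventory", (1, "pantry inventory")),
        ("pantry", (2, "knowledge capture")), ("reading", (2, "knowledge capture")),
        ("knowledge", (2, "knowledge capture")), ("ocr", (2, "knowledge capture")),
        ("capture", (2, "knowledge capture")) ] := by rfl
  rw [hmk]
  simp [PySem.Dict.get?, pvChain, pvG0, pvG1, pvG2, h1, h2, h3, h4, h5, h6, h7, h8, h9,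
    Ne.symm h1, Ne.symm h2, Ne.symm h3, Ne.symm h4, Ne.symm h5,
    Ne.symm h6, Ne.symm h7, Ne.symm h8, Ne.symm h9]

theorem pvHit_cons (d : String) (ds : List String) (g : List String) :
    pvHit (d :: ds) g = (decide (pvNorm d ∈ g) || pvHit ds g) := by
  simp [pvHit]

theorem pvFoldB_canon (ds : List String) : ds.foldl pvStepB none = pvCanonE ds := by
  induction ds with
  | nil => rfl
  | cons d ds ih =>
      have h1 : (d :: ds).foldl pvStepB none = pvMerge (pvEntry d) (pvCanonE ds) := by
        rw [List.foldl_cons, pvFoldB, pvStepB_eq_merge, ih]; rfl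
      rw [h1, pvEntry_char]
      unfold pvCanonE
      rw [pvMerge_chain, pvHit_cons, pvHit_cons, pvHit_cons]

-- A-side: membership of the comprehension-built set
theorem pvSetA_mem (ds : List String) (acc : PySem.Set String) (k : String) :
    (k ∈ ds.foldl
      (fun s d => if PySem.Str.strip d ≠ "" then PySem.Set.add s (PySem.Str.lower (PySem.Str.strip d)) else s)
      acc) ↔ k ∈ acc ∨ ∃ d ∈ ds, PySem.Str.strip d ≠ "" ∧ pvNorm d = k := by
  induction ds generalizing acc with
  | nil => simp
  | cons d ds ih =>
      simp only [List.foldl_cons]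
      rw [ih]
      by_cases h : PySem.Str.strip d = ""
      · simp [h]
      · simp [h, PySem.Set.mem_add, pvNorm]
        aesop

theorem pvNorm_empty (d : String) (h : PySem.Str.strip d = "") : pvNorm d = "" := by
  unfold pvNorm; rw [h]; decide

theorem pvInter_hit (ds : List String) (g : List String) (hg : "" ∉ g) :
    (PySem.Set.inter
        (ds.foldl
          (fun s d => if PySem.Str.strip d ≠ "" then PySem.Set.add s (PySem.Str.lower (PySem.Str.strip d)) else s)
          PySem.Set.empty)
        (PySem.Set.ofList g) ≠ []) ↔ pvHit ds g = true := by
  rw [← List.isEmpty_eq_false_iff, List.isEmpty_eq_false_iff_exists_mem]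
  constructor
  · rintro ⟨k, hk⟩
    rw [PySem.Set.mem_inter] at hk
    obtain ⟨hkS, hkG⟩ := hk
    rw [pvSetA_mem] at hkS
    rcases hkS with h' | ⟨d, hd, _, hnd⟩
    · simp [PySem.Set.empty] at h'
    · simp only [pvHit, List.any_eq_true, decide_eq_true_eq]
      exact ⟨d, hd, by rw [hnd]; exact (PySem.Set.mem_ofList _ _).mp hkG⟩
  · intro hh
    simp only [pvHit, List.any_eq_true, decide_eq_true_eq] at hh
    obtain ⟨d, hd, hdg⟩ := hh
    refine ⟨pvNorm d, ?_⟩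
    rw [PySem.Set.mem_inter, pvSetA_mem, PySem.Set.mem_ofList]
    have hne : PySem.Str.strip d ≠ "" := by
      intro h0
      rw [pvNorm_empty d h0] at hdg
      exact hg hdg
    exact ⟨Or.inr ⟨d, hd, hne, rfl⟩, hdg⟩

theorem pvA_canon (ds : List String) :
    theme_from_domain_py ds = (pvCanonE ds).map (·.2) := by
  unfold theme_from_domain_py
  by_cases hds : ds = []
  · subst hds; rfl
  · simp only [hds, if_false]
    set S := ds.foldl
      (fun s d => if PySem.Str.strip d ≠ "" then PySem.Set.add s (PySem.Str.lower (PySem.Str.strip d)) else s)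
      PySem.Set.empty with hS
    have h0 := pvInter_hit ds pvG0 (by decide)
    have h1 := pvInter_hit ds pvG1 (by decide)
    have h2 := pvInter_hit ds pvG2 (by decide)
    rw [← hS] at h0 h1 h2

    by_cases hE : S = PySem.Set.empty
    · -- empty set: no domain survives the strip filter, so no group is hit; both sides none
      have hnone : ∀ g : List String, "" ∉ g → pvHit ds g = true → False := by
        intro g hg hh
        simp only [pvHit, List.any_eq_true, decide_eq_true_eq] at hh
        obtain ⟨d, hd, hdg⟩ := hh
        by_cases hstr : PySem.Str.strip d = ""
        · exact hg (by rw [← pvNorm_empty d hstr]; exact hdg)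
        · have hmem : pvNorm d ∈ S := by
            rw [hS, pvSetA_mem]; exact Or.inr ⟨d, hd, hstr, rfl⟩
          rw [hE] at hmem; simp [PySem.Set.empty] at hmem
      have e0 : pvHit ds pvG0 = false := Bool.eq_false_iff.mpr (hnone pvG0 (by decide))
      have e1 : pvHit ds pvG1 = false := Bool.eq_false_iff.mpr (hnone pvG1 (by decide))
      have e2 : pvHit ds pvG2 = false := Bool.eq_false_iff.mpr (hnone pvG2 (by decide))
      simp [hE, pvCanonE, e0, e1, e2, pvChain]
    · simp only [hE, if_false]
      unfold pvScanA pvPriority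
      unfold pvCanonE pvChain
      simp only [pvG0, pvG1, pvG2] at h0 h1 h2 ⊢
      by_cases b0 : pvHit ds ["recipes", "instagram"] = true
      · rw [if_pos (h0.mpr b0)]; simp [b0]
      · rw [if_neg (fun h => b0 (h0.mp h))]
        simp only [Bool.not_eq_true] at b0
        unfold pvScanA
        by_cases b1 : pvHit ds ["groceries", "inventory"] = true
        · rw [if_pos (h1.mpr b1)]; simp [b0, b1]
        · rw [if_neg (fun h => b1 (h1.mp h))]
          simp only [Bool.not_eq_true] at b1
          unfold pvScanA
          by_cases b2 : pvHit ds ["pantry", "reading", "knowledge", "ocr", "capture"] = true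
          · rw [if_pos (h2.mpr b2)]; simp [b0, b1, b2]
          · rw [if_neg (fun h => b2 (h2.mp h))]
            simp only [Bool.not_eq_true] at b2
            simp [b0, b1, b2, pvScanA]

-- ===== VERDICT (by name: the statement is the Claim_ definition above) =====
theorem theme_from_domain_py_spec : Claim_equal_theme_from_domain_py := by
  intro ds _
  unfold Spec_theme_from_domain_py theme_from_domain_py_alt
  rw [pvA_canon, pvFoldB_canon]
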